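-- pv_equiv track=rewrite | github.com/humblemat810/max_col | max_col.py | get_initial_guess
-- ===== SOURCE A (Python) =====
-- def get_initial_guess(input_ls_str, limit):
--     total = -1
--     n_col_start_with = 0
--     for word in input_ls_str:
--         if total + 1 + len(word) <= limit:
--             total+= 1 + len(word)
--             n_col_start_with += 1
--         else:
--             break
--     return n_col_start_with
-- ===== SOURCE B (Python) =====
-- def get_initial_guess(input_ls_str, limit):
--     # Pass 1: build the table of cumulative costs (total after taking each word).
--     totals = []
--     t = -1
--     for w in input_ls_str:
--         t += 1 + len(w)
--         totals.append(t)
--     # Pass 2: count leading totals within the limit.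
--     k = 0
--     while k < len(totals) and totals[k] <= limit:
--         k += 1
--     return k
-- ===== Notes on version B (the rewrite author's own statement) =====
-- stated objective: alternative
-- what changed: B splits A's single accumulate-and-break loop into two passes: it first materialises the cumulative cost table, then counts the leading entries that are <= limit.
import Mathlib
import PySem

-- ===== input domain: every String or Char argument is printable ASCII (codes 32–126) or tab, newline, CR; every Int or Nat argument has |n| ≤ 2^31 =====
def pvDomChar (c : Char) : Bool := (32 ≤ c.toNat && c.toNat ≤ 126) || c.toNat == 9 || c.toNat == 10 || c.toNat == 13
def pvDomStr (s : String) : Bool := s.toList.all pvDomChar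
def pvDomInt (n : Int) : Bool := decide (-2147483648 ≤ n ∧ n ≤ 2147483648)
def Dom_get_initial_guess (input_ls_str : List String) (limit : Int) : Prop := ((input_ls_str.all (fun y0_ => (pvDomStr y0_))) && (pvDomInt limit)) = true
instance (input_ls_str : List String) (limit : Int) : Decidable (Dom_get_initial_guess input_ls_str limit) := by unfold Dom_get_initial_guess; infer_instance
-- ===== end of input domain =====

-- B replaces A's single accumulate-and-break loop by two passes: build the cumulative cost table, then count the leading entries within the limit (alternative decomposition, same cost).

-- ===== PORT A =====
-- A's for-loop with break: recursion over the words carrying (total, n_col_start_with).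
def pvLoopA (limit : Int) : Int → Int → List String → Int
  | _, n, [] => n
  | total, n, w :: ws =>
    if total + 1 + PySem.Str.len w ≤ limit then
      pvLoopA limit (total + 1 + PySem.Str.len w) (n + 1) ws
    else n

def get_initial_guess (input_ls_str : List String) (limit : Int) : Int :=
  pvLoopA limit (-1) 0 input_ls_str

-- ===== PORT B =====
-- pass 1: the cumulative cost table (total after taking each word)
def pvTotals (t : Int) : List String → List Int
  | [] => []
  | w :: ws => (t + 1 + PySem.Str.len w) :: pvTotals (t + 1 + PySem.Str.len w) ws

-- pass 2: B's while-loop counting leading entries ≤ limit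
def pvCountLeading (limit : Int) : List Int → Int
  | [] => 0
  | x :: xs => if x ≤ limit then 1 + pvCountLeading limit xs else 0

def get_initial_guess_alt (input_ls_str : List String) (limit : Int) : Int :=
  pvCountLeading limit (pvTotals (-1) input_ls_str)

-- ===== PRECONDITION & SPEC =====
def Spec_get_initial_guess (input_ls_str : List String) (limit : Int) (out : Int) : Prop := out = get_initial_guess_alt input_ls_str limit
instance (input_ls_str : List String) (limit : Int) (out : Int) : Decidable (Spec_get_initial_guess input_ls_str limit out) := by unfold Spec_get_initial_guess; infer_instance

-- ===== CLAIM (what is proved, stated in full; the proofs are below) =====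
def Claim_equal_get_initial_guess : Prop := ∀ (input_ls_str : List String) (limit : Int), Dom_get_initial_guess input_ls_str limit → Spec_get_initial_guess input_ls_str limit (get_initial_guess input_ls_str limit)

-- ===== LEMMAS AND PROOFS =====
theorem pvLoopA_eq (limit : Int) (ws : List String) :
    ∀ (t n : Int), pvLoopA limit t n ws = n + pvCountLeading limit (pvTotals t ws) := by
  induction ws with
  | nil => intro t n; simp [pvLoopA, pvTotals, pvCountLeading]
  | cons w ws ih =>
    intro t n
    simp only [pvLoopA, pvTotals, pvCountLeading]
    split_ifs with h
    · rw [ih]; ring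
    · simp

-- ===== VERDICT (by name: the statement is the Claim_ definition above) =====
theorem get_initial_guess_spec : Claim_equal_get_initial_guess := by
  intro ls limit _
  unfold Spec_get_initial_guess get_initial_guess get_initial_guess_alt
  rw [pvLoopA_eq]; ring
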